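-- pv_equiv track=rewrite | github.com/polilinary/networks | baseline_solution.py | find_any_path
-- ===== SOURCE A (Python) =====
-- def find_any_path(graph, start, end, path=[]):
--     """Находит любой путь от start до end (рекурсивный поиск в глубину)"""
--     path = path + [start]
--
--     if start == end:
--         return path
--
--     if start not in graph:
--         return None
--
--     for node in graph[start]:
--         if node not in path:
--             newpath = find_any_path(graph, node, end, path)
--             if newpath:
--                 return newpath
--     return None
-- ===== SOURCE B (Python) =====
-- def find_any_path(graph, start, end, path=[]):
--     """Iterative DFS over an explicit stack of (node, trail) frames where the
--     trail is already extended with the node at push time; neighbours are pushed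
--     in reverse so the same first DFS-preorder path is returned."""
--     frames = [(start, path + [start])]
--     while frames:
--         node, trail = frames.pop()
--         if node == end:
--             return trail
--         for nb in reversed(graph.get(node, ())):
--             if nb not in trail:
--                 frames.append((nb, trail + [nb]))
--     return None
-- ===== Notes on version B (the rewrite author's own statement) =====
-- stated objective: alternative
-- what changed: recursive DFS replaced by an iterative DFS over an explicit stack of (node, trail) frames with the trail extended at push time and a defaulting graph lookup, pushing neighbours in reverse so the same first preorder path is returned
import Mathlib
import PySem

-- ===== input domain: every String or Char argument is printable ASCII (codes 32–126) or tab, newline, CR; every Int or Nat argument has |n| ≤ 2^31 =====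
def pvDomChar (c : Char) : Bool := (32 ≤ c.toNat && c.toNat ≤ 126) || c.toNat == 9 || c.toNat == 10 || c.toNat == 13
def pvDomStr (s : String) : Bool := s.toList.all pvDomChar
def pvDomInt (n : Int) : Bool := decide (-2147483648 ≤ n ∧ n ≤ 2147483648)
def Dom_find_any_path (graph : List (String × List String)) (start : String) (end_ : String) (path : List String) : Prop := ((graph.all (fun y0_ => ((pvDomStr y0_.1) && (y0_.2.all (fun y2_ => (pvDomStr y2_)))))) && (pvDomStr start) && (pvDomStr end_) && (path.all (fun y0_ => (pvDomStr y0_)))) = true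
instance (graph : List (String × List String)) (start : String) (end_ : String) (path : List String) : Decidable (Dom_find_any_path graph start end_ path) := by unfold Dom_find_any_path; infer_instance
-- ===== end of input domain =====

-- B rewrites the recursive DFS as an iterative DFS over an explicit stack of (node, trail)
-- frames, extending the trail at push time (objective: alternative decomposition; same
-- first-path-in-DFS-preorder return value).

-- ===== PORT A =====
-- Termination-measure helpers (cited by name in A's decreasing_by; not part of the algorithm).
-- pvAllNodes: every key and every neighbour occurring in the graph.
def pvAllNodes (graph : List (String × List String)) : List String :=
  graph.flatMap (fun kv => kv.1 :: kv.2)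

-- pvNu: how many distinct graph nodes are not yet on the path.
def pvNu (graph : List (String × List String)) (path : List String) : Nat :=
  ((pvAllNodes graph).dedup.filter (fun x => decide (x ∉ path))).length

theorem pv_lookup_nodes {graph : List (String × List String)} {k : String} {v : List String}
    (h : List.lookup k graph = some v) :
    (∀ x ∈ v, x ∈ pvAllNodes graph) ∧ v.length ≤ (pvAllNodes graph).length := by
  induction graph with
  | nil => simp [List.lookup] at h
  | cons hd t ih =>
    rw [List.lookup] at h
    by_cases hk : (k == hd.1) = true
    · simp only [hk] at h
      injection h with h; subst h
      constructor
      · intro x hx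
        unfold pvAllNodes; rw [List.flatMap_cons]
        exact List.mem_append_left _ (List.mem_cons_of_mem _ hx)
      · unfold pvAllNodes; rw [List.flatMap_cons, List.length_append, List.length_cons]
        omega
    · simp only [hk] at h
      obtain ⟨h1, h2⟩ := ih h
      constructor
      · intro x hx
        unfold pvAllNodes; rw [List.flatMap_cons]
        exact List.mem_append_right _ (h1 x hx)
      · unfold pvAllNodes at h2 ⊢; rw [List.flatMap_cons, List.length_append, List.length_cons]
        omega

theorem pvNu_lt {graph : List (String × List String)} {path : List String} {node : String}
    (hN : node ∈ pvAllNodes graph) (hnp : node ∉ path) :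
    pvNu graph (path ++ [node]) < pvNu graph path := by
  unfold pvNu
  have hptw : ∀ a ∈ (pvAllNodes graph).dedup,
      (decide (a ∉ path ++ [node])) = ((fun a => decide (a ≠ node)) a && (fun a => decide (a ∉ path)) a) := by
    intro a _
    by_cases h1 : a = node <;> by_cases h2 : a ∈ path <;> simp [h1, h2]
  rw [List.filter_congr hptw, ← List.filter_filter]
  apply List.length_filter_lt_length_iff_exists.2
  exact ⟨node, by simp [List.mem_filter, List.mem_dedup, hN, hnp], by simp⟩

-- Port of A: literal transliteration of the recursive DFS.
-- 'start not in graph' / 'graph[start]' is the Python dict key lookup (first match on the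
-- association list); 'if newpath:' — newpath is None or a nonempty list path+[start]+…, so its
-- truthiness is exactly "the recursive call returned a path" and is ported as the some-case.
def find_any_path (graph : List (String × List String)) (start : String) (end_ : String) (path : List String) : Option (List String) :=
  let path' := path ++ [start]                    -- path = path + [start]
  if start == end_ then some path'                -- if start == end: return path
  else
    match hm : List.lookup start graph with
    | none => none                                -- if start not in graph: return None
    | some nbrs =>
      nbrs.attach.foldl                           -- for node in graph[start]:
        (fun acc x =>
          match acc with
          | some r => some r                      -- (a path was already returned)
          | none =>
            if x.1 ∈ path' then none              -- if node not in path: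
            else find_any_path graph x.1 end_ path')  -- newpath = find_any_path(...); if newpath: return newpath
        none                                      -- return None
termination_by pvNu graph (path ++ [start])
decreasing_by
  exact pvNu_lt ((pv_lookup_nodes hm).1 x.1 x.2) (by assumption)

-- ===== PORT B =====
-- B-side termination machinery (separate from A's): the set of graph nodes as a Finset,
-- the count of nodes not yet on a trail, and an exponential stack weight.
def fapGNodes (graph : List (String × List String)) : Finset String :=
  graph.foldr (fun kv s => insert kv.1 (kv.2.foldr insert s)) ∅

def fapRem (graph : List (String × List String)) (trail : List String) : Nat :=
  ((fapGNodes graph).filter (fun x => x ∉ trail)).card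

def fapBase (graph : List (String × List String)) : Nat :=
  (graph.map (fun kv => kv.2.length)).sum + 2

def fapWt (graph : List (String × List String)) (frames : List (String × List String)) : Nat :=
  (frames.map (fun fr => fapBase graph ^ fapRem graph fr.2)).sum

theorem fap_mem_foldr_insert (l : List String) (s : Finset String) (x : String)
    (h : x ∈ l ∨ x ∈ s) : x ∈ l.foldr insert s := by
  induction l with
  | nil => simpa using h.resolve_left (by simp)
  | cons a t ih =>
    rcases h with h | h
    · rcases List.mem_cons.1 h with rfl | h
      · simp
      · simpa using Or.inr (ih (Or.inl h))
    · simpa using Or.inr (ih (Or.inr h))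

theorem fapGNodes_cons_sub (hd : String × List String) (t : List (String × List String)) :
    fapGNodes t ⊆ fapGNodes (hd :: t) := by
  intro x hx
  unfold fapGNodes
  rw [List.foldr_cons]
  exact Finset.mem_insert_of_mem (fap_mem_foldr_insert _ _ _ (Or.inr hx))

theorem fap_lookup_bound {graph : List (String × List String)} {k : String} {v : List String}
    (h : List.lookup k graph = some v) :
    v.length + 2 ≤ fapBase graph ∧ ∀ nb ∈ v, nb ∈ fapGNodes graph := by
  induction graph with
  | nil => simp [List.lookup] at h
  | cons hd t ih =>
    rw [List.lookup] at h
    by_cases hk : (k == hd.1) = true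
    · simp only [hk] at h
      injection h with h; subst h
      refine ⟨?_, fun nb hnb => ?_⟩
      · unfold fapBase; rw [List.map_cons, List.sum_cons]; omega
      · unfold fapGNodes; rw [List.foldr_cons]
        exact Finset.mem_insert_of_mem (fap_mem_foldr_insert _ _ _ (Or.inl hnb))
    · simp only [hk] at h
      obtain ⟨h1, h2⟩ := ih h
      refine ⟨?_, fun nb hnb => fapGNodes_cons_sub hd t (h2 nb hnb)⟩
      unfold fapBase at h1 ⊢; rw [List.map_cons, List.sum_cons]; omega

theorem fapRem_lt {graph : List (String × List String)} {trail : List String} {nb : String}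
    (hN : nb ∈ fapGNodes graph) (hnt : nb ∉ trail) :
    fapRem graph (trail ++ [nb]) < fapRem graph trail := by
  unfold fapRem
  have hsub : (fapGNodes graph).filter (fun x => x ∉ trail ++ [nb]) ⊆
      (fapGNodes graph).filter (fun x => x ∉ trail) := by
    intro x hx
    simp only [Finset.mem_filter] at hx ⊢
    exact ⟨hx.1, fun hmem => hx.2 (by simp [hmem])⟩
  exact Finset.card_lt_card ((Finset.ssubset_iff_of_subset hsub).2
    ⟨nb, by simp [Finset.mem_filter, hN, hnt], by simp [Finset.mem_filter]⟩)

-- 'for nb in reversed(graph.get(node, ())): if nb not in trail: frames.append((nb, trail + [nb]))'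
-- (the stack is kept top-first, so Python's append-at-the-end is cons at the head).
def fapPush (trail : List String) (st : List (String × List String)) (nbrs : List String) : List (String × List String) :=
  nbrs.reverse.foldl (fun st nb => if nb ∈ trail then st else (nb, trail ++ [nb]) :: st) st

theorem fapPush_aux (trail : List String) :
    ∀ (m : List String) (st : List (String × List String)),
      m.foldl (fun st nb => if nb ∈ trail then st else (nb, trail ++ [nb]) :: st) st =
        (m.reverse.filter (fun nb => decide (nb ∉ trail))).map (fun nb => (nb, trail ++ [nb])) ++ st := by
  intro m
  induction m with
  | nil => intro st; simp
  | cons x t ih =>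
    intro st
    rw [List.foldl_cons, ih, List.reverse_cons, List.filter_append, List.map_append, List.append_assoc]
    congr 1
    by_cases hx : x ∈ trail <;> simp [hx]

theorem fapPush_eq (trail : List String) (st : List (String × List String)) (nbrs : List String) :
    fapPush trail st nbrs =
      (nbrs.filter (fun nb => decide (nb ∉ trail))).map (fun nb => (nb, trail ++ [nb])) ++ st := by
  unfold fapPush
  rw [fapPush_aux, List.reverse_reverse]

theorem fapWt_push_lt (graph : List (String × List String)) (node : String)
    (trail : List String) (rest : List (String × List String)) :
    fapWt graph (fapPush trail rest ((List.lookup node graph).getD [])) <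
      fapWt graph ((node, trail) :: rest) := by
  rw [fapPush_eq]
  unfold fapWt
  rw [List.map_append, List.sum_append, List.map_cons, List.sum_cons]
  have hBpos : 0 < fapBase graph := by unfold fapBase; omega
  set nbrs := (List.lookup node graph).getD [] with hn
  have hkey : ((((nbrs.filter (fun nb => decide (nb ∉ trail))).map (fun nb => (nb, trail ++ [nb]))).map
      (fun fr => fapBase graph ^ fapRem graph fr.2)).sum) < fapBase graph ^ fapRem graph trail := by
    set L := nbrs.filter (fun nb => decide (nb ∉ trail)) with hL
    by_cases hLe : L = []
    · rw [hLe]; simpa using Nat.pow_pos hBpos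
    · have hsome : List.lookup node graph = some nbrs := by
        rcases hlk : List.lookup node graph with _ | v
        · exfalso; apply hLe; rw [hL, hn, hlk]; rfl
        · rw [hn, hlk]; rfl
      obtain ⟨hlen, hmemN⟩ := fap_lookup_bound hsome
      obtain ⟨nb0, hmem0⟩ := List.exists_mem_of_ne_nil L hLe
      have h0 := List.mem_filter.1 (hL ▸ hmem0)
      have hlt0 : fapRem graph (trail ++ [nb0]) < fapRem graph trail :=
        fapRem_lt (hmemN nb0 h0.1) (by simpa using h0.2)
      have hbound : ∀ w ∈ ((L.map (fun nb => (nb, trail ++ [nb]))).map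
          (fun fr => fapBase graph ^ fapRem graph fr.2)),
          w ≤ fapBase graph ^ (fapRem graph trail - 1) := by
        intro w hw
        simp only [List.map_map, List.mem_map, Function.comp] at hw
        obtain ⟨nb, hnb, rfl⟩ := hw
        have h := List.mem_filter.1 (hL ▸ hnb)
        have hlt : fapRem graph (trail ++ [nb]) < fapRem graph trail :=
          fapRem_lt (hmemN nb h.1) (by simpa using h.2)
        exact Nat.pow_le_pow_right hBpos (by omega)
      have hsum := List.sum_le_card_nsmul _ _ hbound
      simp only [smul_eq_mul, List.length_map] at hsum
      have hcnt : L.length ≤ fapBase graph - 2 := by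
        have h1 : L.length ≤ nbrs.length := hL ▸ List.length_filter_le _ _
        omega
      have hfin : L.length * fapBase graph ^ (fapRem graph trail - 1) <
          fapBase graph ^ fapRem graph trail := by
        calc L.length * fapBase graph ^ (fapRem graph trail - 1)
            ≤ (fapBase graph - 2) * fapBase graph ^ (fapRem graph trail - 1) :=
              Nat.mul_le_mul_right _ hcnt
          _ < fapBase graph * fapBase graph ^ (fapRem graph trail - 1) :=
              (Nat.mul_lt_mul_right (Nat.pow_pos hBpos)).2 (by unfold fapBase; omega)
          _ = fapBase graph ^ fapRem graph trail := by
              rw [← pow_succ']; congr 1; omega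
      exact lt_of_le_of_lt hsum hfin
  have hproj : fapBase graph ^ fapRem graph ((node, trail) : String × List String).2 =
      fapBase graph ^ fapRem graph trail := rfl
  omega

-- Port of B: the while-loop over the explicit stack of (node, trail) frames
-- (head of the list = top of the stack; 'graph.get(node, ())' is the defaulting lookup).
def fapRun (graph : List (String × List String)) (end_ : String) (frames : List (String × List String)) : Option (List String) :=
  match frames with
  | [] => none                                    -- while frames exhausted: return None
  | (node, trail) :: rest =>                      -- node, trail = frames.pop()
    if node == end_ then some trail               -- if node == end: return trail
    else
      fapRun graph end_ (fapPush trail rest ((List.lookup node graph).getD []))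
termination_by fapWt graph frames
decreasing_by
  exact fapWt_push_lt graph node trail rest

def find_any_path_alt (graph : List (String × List String)) (start : String) (end_ : String) (path : List String) : Option (List String) :=
  fapRun graph end_ [(start, path ++ [start])]    -- frames = [(start, path + [start])]; while frames: …

-- ===== PRECONDITION & SPEC =====
def Spec_find_any_path (graph : List (String × List String)) (start : String) (end_ : String) (path : List String) (out : Option (List String)) : Prop := out = find_any_path_alt graph start end_ path
instance (graph : List (String × List String)) (start : String) (end_ : String) (path : List String) (out : Option (List String)) : Decidable (Spec_find_any_path graph start end_ path out) := by unfold Spec_find_any_path; infer_instance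

-- ===== CLAIM (what is proved, stated in full; the proofs are below) =====
def Claim_equal_find_any_path : Prop := ∀ (graph : List (String × List String)) (start : String) (end_ : String) (path : List String), Dom_find_any_path graph start end_ path → Spec_find_any_path graph start end_ path (find_any_path graph start end_ path)

-- ===== LEMMAS AND PROOFS =====

-- The body of A's for-loop, as a named step function (used only in the proofs).
def fap_step (graph : List (String × List String)) (e : String) (path' : List String)
    (acc : Option (List String)) (nb : String) : Option (List String) :=
  match acc with
  | some r => some r
  | none => if nb ∈ path' then none else find_any_path graph nb e path'

-- One-step unfolding of A's port through the named step function.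
theorem find_any_path_eq (graph : List (String × List String)) (start e : String) (path : List String) :
    find_any_path graph start e path =
      if start == e then some (path ++ [start])
      else
        match List.lookup start graph with
        | none => none
        | some nbrs => nbrs.foldl (fap_step graph e (path ++ [start])) none := by
  rw [find_any_path]
  by_cases he : (start == e) = true
  · simp [he]
  · simp only [he, Bool.false_eq_true, if_false]
    rcases h : List.lookup start graph with _ | nbrs
    · rfl
    · have hfun : (fun (acc : Option (List String)) (x : {a // a ∈ nbrs}) =>
          match acc with
          | some r => some r
          | none => if x.1 ∈ path ++ [start] then none
                    else find_any_path graph x.1 e (path ++ [start])) =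
          fun acc x => fap_step graph e (path ++ [start]) acc x.1 := by
        funext acc x; cases acc <;> rfl
      exact Eq.trans (congrFun (congrFun (congrArg List.foldl hfun) none) nbrs.attach)
        List.foldl_attach

-- Branch-resolved forms of A's unfolding (used in the loop invariant proof).
theorem fapA_none (graph : List (String × List String)) (start e : String) (path : List String)
    (he : (start == e) = false) (hm : List.lookup start graph = none) :
    find_any_path graph start e path = none := by
  rw [find_any_path_eq, hm]
  simp [he]

theorem fapA_some (graph : List (String × List String)) (start e : String) (path : List String)
    (nbrs : List String) (he : (start == e) = false) (hm : List.lookup start graph = some nbrs) :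
    find_any_path graph start e path =
      nbrs.foldl (fap_step graph e (path ++ [start])) none := by
  rw [find_any_path_eq, hm]
  simp [he]

theorem fap_step_someAcc (graph : List (String × List String)) (e : String) (path' : List String) :
    ∀ (l : List String) (r : List String), l.foldl (fap_step graph e path') (some r) = some r := by
  intro l
  induction l with
  | nil => intro r; rfl
  | cons x t ih => intro r; rw [List.foldl_cons]; exact ih r

-- A's for-loop, seen with a continuation X, is the orElse-chain over the unvisited neighbours.
theorem foldl_dfs_orElse (graph : List (String × List String)) (e : String) (path' : List String) :
    ∀ (l : List String) (X : Option (List String)),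
      (l.foldl (fap_step graph e path') none).orElse (fun _ => X) =
      (l.filter (fun nb => decide (nb ∉ path'))).foldr
        (fun nb acc => (find_any_path graph nb e path').orElse (fun _ => acc)) X := by
  intro l
  induction l with
  | nil => intro X; rfl
  | cons nb t ih =>
    intro X
    rw [List.foldl_cons, List.filter_cons]
    by_cases hnb : nb ∈ path'
    · have hstep : fap_step graph e path' none nb = none := by simp [fap_step, hnb]
      rw [hstep, if_neg (by simp [hnb])]
      exact ih X
    · have hstep : fap_step graph e path' none nb = find_any_path graph nb e path' := by
        simp [fap_step, hnb]
      rw [hstep, if_pos (by simp [hnb]), List.foldr_cons]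
      rcases hA : find_any_path graph nb e path' with _ | r
      · rw [← ih X]; rfl
      · rw [fap_step_someAcc]; rfl

theorem fapRun_nil (graph : List (String × List String)) (e : String) : fapRun graph e [] = none := by
  rw [fapRun]

theorem fapRun_cons (graph : List (String × List String)) (e node : String)
    (trail : List String) (rest : List (String × List String)) :
    fapRun graph e ((node, trail) :: rest) =
      if node == e then some trail
      else fapRun graph e (fapPush trail rest ((List.lookup node graph).getD [])) := by
  rw [fapRun]

-- The main invariant: on stacks whose every frame's trail ends with its node, the iterative
-- loop computes the orElse-chain of the recursive DFS over the stack entries, top first.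
theorem run_eq (graph : List (String × List String)) (e : String) :
    ∀ (k : Nat) (frames : List (String × List String)), fapWt graph frames ≤ k →
      (∀ fr ∈ frames, ∃ p, fr.2 = p ++ [fr.1]) →
      fapRun graph e frames =
        frames.foldr (fun fr acc =>
          (find_any_path graph fr.1 e fr.2.dropLast).orElse (fun _ => acc)) none := by
  intro k
  induction k with
  | zero =>
    intro frames h _
    match frames with
    | [] => exact fapRun_nil graph e
    | (node, trail) :: rest =>
      exfalso
      unfold fapWt at h
      simp only [List.map_cons, List.sum_cons] at h
      have : 1 ≤ fapBase graph ^ fapRem graph trail :=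
        Nat.one_le_pow _ _ (by unfold fapBase; omega)
      omega
  | succ k ih =>
    intro frames h hfr
    match frames with
    | [] => exact fapRun_nil graph e
    | (node, trail) :: rest =>
      obtain ⟨q, hq⟩ := hfr (node, trail) (List.mem_cons_self)
      simp only at hq; subst hq
      have hdrop : (q ++ [node]).dropLast = q := by simp
      have hWrest : fapWt graph rest ≤ k := by
        unfold fapWt at h ⊢
        simp only [List.map_cons, List.sum_cons] at h
        have : 1 ≤ fapBase graph ^ fapRem graph (q ++ [node]) :=
          Nat.one_le_pow _ _ (by unfold fapBase; omega)
        omega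
      rw [fapRun_cons, List.foldr_cons]
      simp only [hdrop]
      by_cases he : (node == e) = true
      · rw [if_pos he, find_any_path_eq]
        simp [he]
      · rw [if_neg he]
        have hrest_fr : ∀ fr ∈ rest, ∃ p, fr.2 = p ++ [fr.1] :=
          fun fr hm => hfr fr (List.mem_cons_of_mem _ hm)
        rcases hm : List.lookup node graph with _ | nbrs
        · rw [fapA_none graph node e q (by simpa using he) hm]
          have hpush : fapPush (q ++ [node]) rest ((none : Option (List String)).getD []) = rest := rfl
          rw [hpush]
          simpa using ih rest hWrest hrest_fr
        · rw [fapA_some graph node e q nbrs (by simpa using he) hm]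
          simp only [Option.getD_some]
          have hlt : fapWt graph (fapPush (q ++ [node]) rest nbrs) ≤ k := by
            have := fapWt_push_lt graph node (q ++ [node]) rest
            rw [hm] at this
            simp only [Option.getD_some] at this
            unfold fapWt at this h ⊢
            simp only [List.map_cons, List.sum_cons] at this h
            omega
          have hpush_fr : ∀ fr ∈ fapPush (q ++ [node]) rest nbrs,
              ∃ p, fr.2 = p ++ [fr.1] := by
            intro fr hmem
            rw [fapPush_eq] at hmem
            rcases List.mem_append.1 hmem with hmem | hmem
            · obtain ⟨nb, _, rfl⟩ := List.mem_map.1 hmem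
              exact ⟨q ++ [node], rfl⟩
            · exact hrest_fr fr hmem
          refine Eq.trans (ih _ hlt hpush_fr) ?_
          rw [fapPush_eq, List.foldr_append, List.foldr_map]
          rw [foldl_dfs_orElse graph e (q ++ [node]) nbrs]
          congr 1
          funext nb acc
          simp

-- ===== VERDICT (by name: the statement is the Claim_ definition above) =====
theorem find_any_path_spec : Claim_equal_find_any_path := by
  intro graph start end_ path _
  unfold Spec_find_any_path find_any_path_alt
  rw [run_eq graph end_ (fapWt graph [(start, path ++ [start])]) [(start, path ++ [start])] le_rfl
      (by intro fr hm; simp at hm; subst hm; exact ⟨path, rfl⟩), List.foldr_cons]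
  rw [show (path ++ [start]).dropLast = path by simp]
  rcases h : find_any_path graph start end_ path with _ | r <;> rfl
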